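-- pv_equiv track=rewrite | github.com/micwuj/Advent_of_Code_2022 | Day 6/6.py | diffrent_letters
-- ===== SOURCE A (Python) =====
-- def diffrent_letters(how_many_letters, txt):
--     tmp = []
--
--     for check, i in enumerate(txt):
--         if check < how_many_letters:
--             tmp.append(i)
--         elif len(set(tmp)) == how_many_letters:
--             return check
--         else:
--             tmp.pop(0)
--             tmp.append(i)
--
--     return 0
-- ===== SOURCE B (Python) =====
-- def diffrent_letters(how_many_letters, txt):
--     counts = {}
--     dups = 0  # number of surplus characters in the current window
--     for i, ch in enumerate(txt):
--         if i >= how_many_letters: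
--             if dups == 0:
--                 return i
--             old = txt[i - how_many_letters]
--             counts[old] -= 1
--             if counts[old] > 0:
--                 dups -= 1
--         c = counts.get(ch, 0)
--         if c > 0:
--             dups += 1
--         counts[ch] = c + 1
--     return 0
-- ===== Notes on version B (the rewrite author's own statement) =====
-- stated objective: faster
-- what changed: Instead of rebuilding set(window) of size k at every position (O(n*k)), B maintains a sliding character-count dict plus a surplus counter updated in O(1) per character, a single O(n) pass.
import Mathlib
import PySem

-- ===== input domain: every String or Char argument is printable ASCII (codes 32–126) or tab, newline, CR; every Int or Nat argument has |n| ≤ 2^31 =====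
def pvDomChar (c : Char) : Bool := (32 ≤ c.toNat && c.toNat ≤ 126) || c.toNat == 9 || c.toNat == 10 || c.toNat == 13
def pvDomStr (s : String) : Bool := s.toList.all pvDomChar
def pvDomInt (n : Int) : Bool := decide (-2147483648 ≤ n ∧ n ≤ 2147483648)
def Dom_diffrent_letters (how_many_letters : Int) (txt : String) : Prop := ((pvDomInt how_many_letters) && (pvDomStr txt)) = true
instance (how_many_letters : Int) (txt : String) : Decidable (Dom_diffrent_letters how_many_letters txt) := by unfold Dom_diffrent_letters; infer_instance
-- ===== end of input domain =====

-- B replaces A's per-step len(set(window)) rescan by a sliding character-count map with a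
-- surplus counter, turning O(n*k) into O(n) (objective: faster, asymptotic).

-- ===== PORT A =====
-- the for-loop of A: cs = remaining characters, check = current index, tmp = current window
def pvALoop (k : Int) (cs : List Char) (check : Int) (tmp : List Char) : Int :=
  match cs with
  | [] => 0
  | c :: rest =>
    if check < k then pvALoop k rest (check + 1) (tmp ++ [c])
    else if ((PySem.Set.ofList tmp).length : Int) = k then check
    else
      match PySem.List.pop? tmp 0 with
      | none => 0  -- Python: IndexError (pop from empty list); excluded by Pre_
      | some r => pvALoop k rest (check + 1) (r.2 ++ [c])

def diffrent_letters (how_many_letters : Int) (txt : String) : Int :=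
  pvALoop how_many_letters txt.toList 0 []

-- ===== PORT B =====
-- the for-loop of Source B: the 'if i >= k' prefix either returns early (Sum.inl) or yields the
-- slid state (Sum.inr); the shared tail then adds the new character ch.
def pvBLoop (k : Int) (txtL : List Char) (cs : List Char) (i : Int)
    (counts : PySem.Dict Char Int) (dups : Int) : Int :=
  match cs with
  | [] => 0
  | ch :: rest =>
    let pre :=
      if k ≤ i then
        if dups = 0 then Sum.inl i
        else
          match PySem.List.pyGet? txtL (i - k) with
          | none => Sum.inl 0   -- Python: IndexError; unreachable (B returns at the first i ≥ k when k < 0)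
          | some old =>
            let counts' := counts.insert old (counts.getD old 0 - 1)
            Sum.inr (counts', if counts'.getD old 0 > 0 then dups - 1 else dups)
      else Sum.inr (counts, dups)
    match pre with
    | Sum.inl v => v
    | Sum.inr (counts, dups) =>
      let c := counts.getD ch 0
      let dups := if c > 0 then dups + 1 else dups
      pvBLoop k txtL rest (i + 1) (counts.insert ch (c + 1)) dups

def diffrent_letters_alt (how_many_letters : Int) (txt : String) : Int :=
  pvBLoop how_many_letters txt.toList txt.toList 0 PySem.Dict.empty 0

-- ===== PRECONDITION & SPEC =====
-- Pre_ excludes only negative how_many_letters with a non-empty txt, where A raises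
-- IndexError (tmp.pop(0) on the empty window).
def Pre_diffrent_letters (how_many_letters : Int) (txt : String) : Prop :=
  0 ≤ how_many_letters ∨ txt = ""
instance (how_many_letters : Int) (txt : String) : Decidable (Pre_diffrent_letters how_many_letters txt) := by
  unfold Pre_diffrent_letters; infer_instance

def pvWitness_diffrent_letters : Int × String := (4, "abcdabcd")

def Spec_diffrent_letters (how_many_letters : Int) (txt : String) (out : Int) : Prop :=
  out = diffrent_letters_alt how_many_letters txt
instance (how_many_letters : Int) (txt : String) (out : Int) : Decidable (Spec_diffrent_letters how_many_letters txt out) := by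
  unfold Spec_diffrent_letters; infer_instance

-- ===== CLAIM (what is proved, stated in full; the proofs are below) =====
def Claim_equal_diffrent_letters : Prop := ∀ (how_many_letters : Int) (txt : String), Dom_diffrent_letters how_many_letters txt → Pre_diffrent_letters how_many_letters txt → Spec_diffrent_letters how_many_letters txt (diffrent_letters how_many_letters txt)

-- ===== LEMMAS AND PROOFS =====

-- |set l₁| = |set l₂| when l₁ and l₂ have the same members
lemma pv_setlen_congr (l₁ l₂ : List Char) (h : ∀ c, c ∈ l₁ ↔ c ∈ l₂) :
    (PySem.Set.ofList l₁).length = (PySem.Set.ofList l₂).length := by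
  have hp : List.Perm (PySem.Set.ofList l₁) (PySem.Set.ofList l₂) := by
    rw [List.perm_ext_iff_of_nodup (PySem.Set.nodup_ofList l₁) (PySem.Set.nodup_ofList l₂)]
    intro a; simp [PySem.Set.mem_ofList, h a]
  exact hp.length_eq

lemma pv_setlen_append (w : List Char) (ch : Char) :
    (PySem.Set.ofList (w ++ [ch])).length
      = (PySem.Set.ofList w).length + (if ch ∈ w then 0 else 1) := by
  have h1 : PySem.Set.ofList (w ++ [ch]) = PySem.Set.add (PySem.Set.ofList w) ch := by
    rw [PySem.Set.ofList_eq_foldl, PySem.Set.ofList_eq_foldl, List.foldl_append]; rfl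
  rw [h1]
  by_cases hm : ch ∈ w
  · simp [PySem.Set.add, PySem.Set.contains, PySem.Set.mem_ofList, hm]
  · simp [PySem.Set.add, PySem.Set.contains, PySem.Set.mem_ofList, hm]

lemma pv_setlen_cons (h : Char) (t : List Char) :
    (PySem.Set.ofList (h :: t)).length
      = (PySem.Set.ofList t).length + (if h ∈ t then 0 else 1) := by
  rw [pv_setlen_congr (h :: t) (t ++ [h]) (by intro c; simp [or_comm])]
  exact pv_setlen_append t h

-- the shared tail of B's loop body preserves the invariants, for window w → w ++ [ch]
lemma pv_add_step (w : List Char) (counts : PySem.Dict Char Int) (dups : Int) (ch : Char)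
    (hc : ∀ c, counts.getD c 0 = (w.count c : Int))
    (hd : dups = (w.length : Int) - ((PySem.Set.ofList w).length : Int)) :
    (∀ c, (counts.insert ch (counts.getD ch 0 + 1)).getD c 0 = ((w ++ [ch]).count c : Int)) ∧
    ((if counts.getD ch 0 > 0 then dups + 1 else dups)
      = (((w ++ [ch]).length : Int) - ((PySem.Set.ofList (w ++ [ch])).length : Int))) := by
  constructor
  · intro c
    rw [PySem.Dict.getD_insert]
    by_cases h : c = ch
    · subst h; simp [List.count_append, hc c]
    · simp [h, hc c, List.count_append, Ne.symm h]
  · rw [pv_setlen_append]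
    have hmem : (counts.getD ch 0 > 0) ↔ ch ∈ w := by
      rw [hc ch]; exact_mod_cast List.count_pos_iff
    by_cases hm : ch ∈ w
    · rw [if_pos (hmem.mpr hm), if_pos hm]
      subst hd; simp [List.length_append]; ring
    · rw [if_neg (fun h => hm (hmem.mp h)), if_neg hm]
      subst hd; simp [List.length_append]

lemma pv_loop_eq (K : Nat) (txtL : List Char) :
    ∀ (rest pre tmp : List Char) (counts : PySem.Dict Char Int) (dups : Int),
    txtL = pre ++ rest →
    tmp = pre.drop (pre.length - K) →
    (∀ c, counts.getD c 0 = (tmp.count c : Int)) →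
    dups = (tmp.length : Int) - ((PySem.Set.ofList tmp).length : Int) →
    pvALoop (K : Int) rest (pre.length : Int) tmp
      = pvBLoop (K : Int) txtL rest (pre.length : Int) counts dups := by
  intro rest
  induction rest with
  | nil => intro pre tmp counts dups _ _ _ _; rfl
  | cons ch rest ih =>
    intro pre tmp counts dups htxt htmp hc hd
    by_cases hj : pre.length < K
    · -- fill phase: check < how_many_letters
      have hA : ((pre.length : Int) < (K : Int)) := by exact_mod_cast hj
      have hpre : tmp = pre := by
        rw [htmp, Nat.sub_eq_zero_of_le (le_of_lt hj), List.drop_zero]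
      obtain ⟨hc', hd'⟩ := pv_add_step tmp counts dups ch hc hd
      have hIH := ih (pre ++ [ch]) (tmp ++ [ch]) (counts.insert ch (counts.getD ch 0 + 1))
        (if counts.getD ch 0 > 0 then dups + 1 else dups)
        (by rw [htxt]; simp)
        (by rw [hpre, Nat.sub_eq_zero_of_le (by simp [List.length_append]; omega), List.drop_zero])
        hc' hd'
      simp only [pvALoop, pvBLoop, if_pos hA, if_neg (not_le.mpr hA)]
      simpa [List.length_append] using hIH
    · rw [not_lt] at hj
      have hnA : ¬ ((pre.length : Int) < (K : Int)) := by exact_mod_cast not_lt.mpr hj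
      have hB : ((K : Int) ≤ (pre.length : Int)) := by exact_mod_cast hj
      have hlen : tmp.length = K := by rw [htmp, List.length_drop]; omega
      have hsle : (PySem.Set.ofList tmp).length ≤ K := by
        have := PySem.Set.length_ofList_le (xs := tmp); omega
      by_cases hset : (PySem.Set.ofList tmp).length = K
      · -- window all distinct: both return the current index
        have hd0 : dups = 0 := by rw [hd, hlen, hset]; ring
        simp only [pvALoop, pvBLoop, if_neg hnA, if_pos hB, if_pos hd0,
          if_pos (show ((PySem.Set.ofList tmp).length : Int) = (K : Int) by exact_mod_cast hset)]
      · -- duplicate in window: slide it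
        have hdne : ¬ (dups = 0) := by
          rw [hd, hlen]; have hlt := lt_of_le_of_ne hsle hset; intro hz; omega
        cases tmp with
        | nil =>
          exfalso
          have : K = 0 := by simpa using hlen.symm
          simp [PySem.Set.ofList, this] at hset
        | cons h t =>
          have hK1 : 1 ≤ K := by rw [← hlen]; simp
          have hjK : pre.length - K < pre.length := by omega
          have hget : PySem.List.pyGet? txtL ((pre.length : Int) - (K : Int)) = some h := by
            have hcast : ((pre.length : Int) - (K : Int)) = ((pre.length - K : Nat) : Int) := by omega
            rw [hcast, PySem.List.pyGet?_natCast, htxt, List.getElem?_append_left hjK]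
            have hd0 : (pre.drop (pre.length - K))[0]? = some h := by rw [← htmp]; rfl
            rw [List.getElem?_drop] at hd0; simpa using hd0
          have hch : counts.getD h 0 = (t.count h : Int) + 1 := by
            rw [hc h]; simp [List.count_cons_self]
          have hc2 : ∀ c, (counts.insert h (counts.getD h 0 - 1)).getD c 0 = (t.count c : Int) := by
            intro c
            rw [PySem.Dict.getD_insert]
            by_cases hce : c = h
            · rw [if_pos hce, hch, hce]; ring
            · rw [if_neg hce, hc c]; simp [Ne.symm hce]
          have hd2 : (if (counts.insert h (counts.getD h 0 - 1)).getD h 0 > 0 then dups - 1 else dups)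
              = ((t.length : Int) - ((PySem.Set.ofList t).length : Int)) := by
            rw [hc2 h, hd, pv_setlen_cons]
            by_cases hm : h ∈ t
            · rw [if_pos (by exact_mod_cast List.count_pos_iff.mpr hm), if_pos hm]
              push_cast [List.length_cons]; ring
            · rw [if_neg (by simpa using fun hcnt => hm (List.count_pos_iff.mp hcnt)), if_neg hm]
              push_cast [List.length_cons]; ring
          obtain ⟨hc', hd'⟩ := pv_add_step t (counts.insert h (counts.getD h 0 - 1))
            (if (counts.insert h (counts.getD h 0 - 1)).getD h 0 > 0 then dups - 1 else dups) ch hc2 hd2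
          have htmp' : t ++ [ch] = (pre ++ [ch]).drop ((pre ++ [ch]).length - K) := by
            have he : (pre ++ [ch]).length - K = (pre.length - K) + 1 := by
              simp [List.length_append]; omega
            rw [he, List.drop_append_of_le_length (by omega)]
            have ht : t = pre.drop (pre.length - K + 1) := by
              have := congrArg (List.drop 1) htmp
              simpa [List.drop_drop, Nat.add_comm] using this
            rw [← ht]
          have hIH := ih (pre ++ [ch]) (t ++ [ch])
            ((counts.insert h (counts.getD h 0 - 1)).insert ch
              ((counts.insert h (counts.getD h 0 - 1)).getD ch 0 + 1))
            _ (by rw [htxt]; simp) htmp' hc' hd'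
          simp only [pvALoop, pvBLoop, if_neg hnA, if_pos hB, if_neg hdne,
            if_neg (show ¬ ((PySem.Set.ofList (h :: t)).length : Int) = (K : Int) by exact_mod_cast hset),
            PySem.List.pop?_zero_cons, hget]
          simpa [List.length_append] using hIH

-- ===== VERDICT (by name: the statement is the Claim_ definition above) =====
theorem diffrent_letters_spec : Claim_equal_diffrent_letters := by
  unfold Claim_equal_diffrent_letters
  intro k txt _ hpre
  unfold Spec_diffrent_letters diffrent_letters diffrent_letters_alt
  rcases hpre with hk | he
  · have hK : k = ((k.toNat : Nat) : Int) := by omega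
    rw [hK]
    have := pv_loop_eq k.toNat txt.toList txt.toList [] [] PySem.Dict.empty 0
      (by simp) (by simp) (by intro c; simp [PySem.Dict.getD_empty]) (by simp [PySem.Set.ofList])
    simpa using this
  · subst he; rfl
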